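-- pv_equiv track=rewrite | github.com/comp-bio/immuno | app/core/db.py | search
-- ===== SOURCE A (Python) =====
-- def search(db, items):
--     results = {}
--     for db_name, db_data in db:
--         results[db_name] = {}
--         for prot in items:
--             if prot not in db_data:
--                 continue
--             results[db_name][prot] = db_data[prot]
--     return results
-- ===== SOURCE B (Python) =====
-- def search(db, items):
--     # Inverted-index join: collapse db to last-data-per-name, index every
--     # protein of every db into postings (name, value) once, then answer each
--     # requested item by a direct postings lookup -- no membership test against
--     # any db_data remains; the per-item work touches only the dbs that
--     # actually contain the item.
--     latest = dict(db)
--     index = {}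
--     for name, data in latest.items():
--         for prot, val in data.items():
--             index.setdefault(prot, []).append((name, val))
--     results = {name: {} for name in latest}
--     for prot in items:
--         for name, val in index.get(prot, ()):
--             results[name][prot] = val
--     return results
-- ===== Notes on version B (the rewrite author's own statement) =====
-- stated objective: faster
-- what changed: B replaces A's per-db membership scan of items by an inverted index: it collapses db to last-data-per-name, builds postings prot -> [(name, value)] over all db data once, and answers each requested item by one direct postings lookup, so no 'prot in db_data' membership test remains and each item touches only the dbs that actually contain it.
import Mathlib
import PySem

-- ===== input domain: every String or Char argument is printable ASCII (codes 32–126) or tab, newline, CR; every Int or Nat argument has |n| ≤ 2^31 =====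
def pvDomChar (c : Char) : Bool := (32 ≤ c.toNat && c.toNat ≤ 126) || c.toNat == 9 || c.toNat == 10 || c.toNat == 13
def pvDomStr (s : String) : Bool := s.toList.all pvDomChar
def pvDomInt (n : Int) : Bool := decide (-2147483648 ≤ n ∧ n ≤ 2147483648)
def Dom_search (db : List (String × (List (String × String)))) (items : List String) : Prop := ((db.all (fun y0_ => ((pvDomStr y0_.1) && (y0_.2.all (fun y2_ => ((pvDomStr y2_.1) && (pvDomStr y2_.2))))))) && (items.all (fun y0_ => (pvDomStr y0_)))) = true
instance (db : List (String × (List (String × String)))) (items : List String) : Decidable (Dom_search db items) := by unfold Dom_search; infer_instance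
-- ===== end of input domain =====

-- B builds an inverted index (protein -> postings of (db name, value)) over all db data once and
-- answers each requested item by a direct postings lookup, instead of A's per-db membership scan of items.

-- ===== PORT A =====
-- A: results = {}; for each (db_name, db_data): results[db_name] = {}; for prot in items:
--    skip if prot not in db_data else results[db_name][prot] = db_data[prot].
def search (db : List (String × (List (String × String)))) (items : List String) : List (String × List (String × String)) :=
  let results : PySem.Dict String (PySem.Dict String String) :=
    db.foldl (fun results nd =>
      items.foldl (fun results prot =>
        if (PySem.Dict.ofList nd.2).contains prot = false then results
        else results.modify nd.1 PySem.Dict.empty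
               (fun d => d.insert prot ((PySem.Dict.ofList nd.2).getD prot "")))
        (results.insert nd.1 PySem.Dict.empty))
      PySem.Dict.empty
  results.items.map (fun p => (p.1, p.2.items))

-- ===== PORT B =====
-- B: latest = dict(db);
--    index = {}; for name, data in latest.items(): for prot, val in data.items():
--        index.setdefault(prot, []).append((name, val))        [= modify prot [] (· ++ [(name, val)])]
--    results = {name: {} for name in latest};
--    for prot in items: for name, val in index.get(prot, ()): results[name][prot] = val.
def search_alt (db : List (String × (List (String × String)))) (items : List String) : List (String × List (String × String)) :=
  let latest : PySem.Dict String (List (String × String)) :=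
    db.foldl (fun d nd => d.insert nd.1 nd.2) PySem.Dict.empty
  let index : PySem.Dict String (List (String × String)) :=
    latest.items.foldl (fun ix nd =>
      (PySem.Dict.ofList nd.2).items.foldl
        (fun ix pv => ix.modify pv.1 [] (fun l => l ++ [(nd.1, pv.2)])) ix)
      PySem.Dict.empty
  let results0 : PySem.Dict String (PySem.Dict String String) :=
    latest.items.foldl (fun r nd => r.insert nd.1 PySem.Dict.empty) PySem.Dict.empty
  let results : PySem.Dict String (PySem.Dict String String) :=
    items.foldl (fun r prot =>
      (index.getD prot []).foldl
        (fun r nv => r.modify nv.1 PySem.Dict.empty (fun d => d.insert prot nv.2)) r)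
      results0
  results.items.map (fun p => (p.1, p.2.items))

-- ===== PRECONDITION & SPEC =====
def Spec_search (db : List (String × (List (String × String)))) (items : List String) (out : List (String × List (String × String))) : Prop := out = search_alt db items
instance (db : List (String × (List (String × String)))) (items : List String) (out : List (String × List (String × String))) : Decidable (Spec_search db items out) := by unfold Spec_search; infer_instance

-- ===== CLAIM (what is proved, stated in full; the proofs are below) =====
def Claim_equal_search : Prop := ∀ (db : List (String × (List (String × String)))) (items : List String), Dom_search db items → Spec_search db items (search db items)

-- ===== LEMMAS AND PROOFS =====

-- the per-db slot both programs end up computing (written with B's branch orientation)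
def pvSlot (data : List (String × String)) (items : List String) : PySem.Dict String String :=
  items.foldl (fun d prot =>
    if (PySem.Dict.ofList data).contains prot then
      d.insert prot ((PySem.Dict.ofList data).getD prot "")
    else d) PySem.Dict.empty

-- the postings list one db contributes to the inverted index for one protein
def pvPost (prot : String) (nd : String × List (String × String)) : List (String × String) :=
  if (PySem.Dict.ofList nd.2).contains prot then
    [(nd.1, (PySem.Dict.ofList nd.2).getD prot "")]
  else []

lemma pv_contains_mk_iff {ν : Type} (L : List (String × ν)) (k : String) :
    (PySem.Dict.mk L).contains k = true ↔ k ∈ L.map Prod.fst := by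
  simp only [PySem.Dict.contains, List.any_eq_true, List.mem_map, beq_iff_eq]

lemma pv_insert_absent {ν : Type} (L : List (String × ν)) (k : String) (v : ν)
    (h : k ∉ L.map Prod.fst) :
    (PySem.Dict.mk L).insert k v = PySem.Dict.mk (L ++ [(k, v)]) := by
  have hc : (PySem.Dict.mk L).contains k = false := by
    rw [← Bool.not_eq_true, pv_contains_mk_iff]; exact h
  simp [PySem.Dict.insert, hc]

lemma pv_get?_mk_skip {ν : Type} (L R : List (String × ν)) (k : String) (d : ν)
    (hL : k ∉ L.map Prod.fst) :
    (PySem.Dict.mk (L ++ (k, d) :: R)).get? k = some d := by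
  induction L with
  | nil => simp [PySem.Dict.get?_mk_cons]
  | cons p L ih =>
    obtain ⟨k', v⟩ := p
    simp only [List.map_cons, List.mem_cons, not_or] at hL
    rw [List.cons_append, PySem.Dict.get?_mk_cons]
    rw [if_neg (show ¬(k' == k) = true from by simp only [beq_iff_eq]; exact fun h => hL.1 h.symm)]
    exact ih hL.2

lemma pv_map_untouched {ν : Type} (L : List (String × ν)) (k : String) (x : String × ν)
    (h : k ∉ L.map Prod.fst) :
    L.map (fun p => if p.1 == k then x else p) = L := by
  induction L with
  | nil => rfl
  | cons p L ih =>
    simp only [List.map_cons, List.mem_cons, not_or] at h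
    rw [List.map_cons, if_neg (show ¬(p.1 == k) = true from by simp only [beq_iff_eq]; exact fun hh => h.1 hh.symm), ih h.2]

lemma pv_modify_mid {ν : Type} (L R : List (String × ν)) (k : String) (d dflt : ν) (f : ν → ν)
    (hL : k ∉ L.map Prod.fst) (hR : k ∉ R.map Prod.fst) :
    (PySem.Dict.mk (L ++ (k, d) :: R)).modify k dflt f = PySem.Dict.mk (L ++ (k, f d) :: R) := by
  have hc : (PySem.Dict.mk (L ++ (k, d) :: R)).contains k = true := by
    rw [pv_contains_mk_iff]; simp
  have hg : (PySem.Dict.mk (L ++ (k, d) :: R)).getD k dflt = d := by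
    simp [PySem.Dict.getD, pv_get?_mk_skip L R k d hL]
  simp only [PySem.Dict.modify, PySem.Dict.insert, hc, hg, if_true]
  congr 1
  simp only [List.map_append, List.map_cons, beq_self_eq_true, if_true]
  rw [pv_map_untouched L k _ hL, pv_map_untouched R k _ hR]

lemma pv_insert_present {ν : Type} (L R : List (String × ν)) (k : String) (d v : ν)
    (hL : k ∉ L.map Prod.fst) (hR : k ∉ R.map Prod.fst) :
    (PySem.Dict.mk (L ++ (k, d) :: R)).insert k v = PySem.Dict.mk (L ++ (k, v) :: R) :=
  pv_modify_mid L R k d d (fun _ => v) hL hR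

lemma pv_keys_replace {ν : Type} (L : List (String × ν)) (k : String) (v : ν) :
    (L.map (fun p => if p.1 == k then (k, v) else p)).map Prod.fst = L.map Prod.fst := by
  rw [List.map_map]
  apply List.map_congr_left
  intro p _
  by_cases h : p.1 = k <;> simp [h]

lemma pv_keys_slot (L : List (String × List (String × String))) (items : List String) :
    (L.map (fun nd => (nd.1, pvSlot nd.2 items))).map Prod.fst = L.map Prod.fst := by
  rw [List.map_map]; rfl

-- keys of a dict stay Nodup under insert
lemma pv_nodup_insert {ν : Type} (d : PySem.Dict String ν) (k : String) (v : ν)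
    (h : (d.items.map Prod.fst).Nodup) : ((d.insert k v).items.map Prod.fst).Nodup := by
  by_cases hc : d.contains k = true
  · simp only [PySem.Dict.insert, hc, if_true]
    rw [pv_keys_replace]
    exact h
  · rw [Bool.not_eq_true] at hc
    simp only [PySem.Dict.insert, hc, Bool.false_eq_true, if_false]
    show (List.map Prod.fst (d.items ++ [(k, v)])).Nodup
    have hk : k ∉ d.items.map Prod.fst := fun hmem => by
      rw [← Bool.not_eq_true] at hc
      exact hc ((pv_contains_mk_iff d.items k).2 hmem)
    simp only [List.nodup_append, List.map_append, List.map_cons, List.map_nil]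
    refine ⟨h, by simp, ?_⟩
    intro a ha b hb
    simp only [List.mem_cons, List.not_mem_nil, or_false] at hb
    subst hb
    exact fun heq => hk (heq ▸ ha)

-- accumulating db into a dict keeps its keys Nodup
lemma pv_dedup_nodup :
    ∀ (db : List (String × (List (String × String)))) (d : PySem.Dict String (List (String × String))),
      (d.items.map Prod.fst).Nodup →
      (((db.foldl (fun d nd => d.insert nd.1 nd.2) d).items).map Prod.fst).Nodup := by
  intro db
  induction db with
  | nil => intro d h; exact h
  | cons nd db ih =>
    intro d h
    rw [List.foldl_cons]
    exact ih _ (pv_nodup_insert d nd.1 nd.2 h)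

-- inner loop of A on a dict in which the current db's name occurs exactly once
lemma pv_A_inner (data : List (String × String)) (k : String) (items : List String) :
    ∀ (L R : List (String × PySem.Dict String String)) (d : PySem.Dict String String),
      k ∉ L.map Prod.fst → k ∉ R.map Prod.fst →
      items.foldl (fun r prot =>
          if (PySem.Dict.ofList data).contains prot = false then r
          else r.modify k PySem.Dict.empty
                 (fun s => s.insert prot ((PySem.Dict.ofList data).getD prot "")))
        (PySem.Dict.mk (L ++ (k, d) :: R))
      = PySem.Dict.mk (L ++ (k,
          items.foldl (fun s prot =>
            if (PySem.Dict.ofList data).contains prot then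
              s.insert prot ((PySem.Dict.ofList data).getD prot "")
            else s) d) :: R) := by
  induction items with
  | nil => intro L R d _ _; rfl
  | cons prot items ih =>
    intro L R d hL hR
    by_cases hc : (PySem.Dict.ofList data).contains prot = true
    · simp only [List.foldl_cons, hc, if_true, Bool.true_eq_false, if_false]
      rw [pv_modify_mid L R k d PySem.Dict.empty _ hL hR]
      exact ih L R _ hL hR
    · simp only [Bool.not_eq_true] at hc
      simp only [List.foldl_cons, hc, if_true, Bool.false_eq_true, if_false]
      exact ih L R d hL hR

-- A's outer loop equals the slot-map over the name→data dict accumulated from db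
lemma pv_A_eq (items : List String) :
    ∀ (db : List (String × (List (String × String)))) (d : PySem.Dict String (List (String × String))),
      (d.items.map Prod.fst).Nodup →
      db.foldl (fun results nd =>
          items.foldl (fun results prot =>
            if (PySem.Dict.ofList nd.2).contains prot = false then results
            else results.modify nd.1 PySem.Dict.empty
                   (fun d => d.insert prot ((PySem.Dict.ofList nd.2).getD prot "")))
            (results.insert nd.1 PySem.Dict.empty))
        (PySem.Dict.mk (d.items.map (fun nd => (nd.1, pvSlot nd.2 items))))
      = PySem.Dict.mk (((db.foldl (fun d nd => d.insert nd.1 nd.2) d).items).map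
          (fun nd => (nd.1, pvSlot nd.2 items))) := by
  intro db
  induction db with
  | nil => intro d _; rfl
  | cons nd db ih =>
    intro d hnd
    rw [List.foldl_cons, List.foldl_cons]
    by_cases hc : d.contains nd.1 = true
    · -- name already present: both the slot dict and the data dict overwrite in place
      have hin : nd.1 ∈ d.items.map Prod.fst := (pv_contains_mk_iff d.items nd.1).1 hc
      obtain ⟨p, hp, hfst⟩ := List.mem_map.1 hin
      obtain ⟨L, R, hLR⟩ := List.append_of_mem hp
      have hsplit : d.items = L ++ (nd.1, p.2) :: R := by
        rw [hLR, ← hfst]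
      have hnd' := hnd
      rw [hsplit, List.map_append, List.map_cons, List.nodup_append] at hnd'
      have hL : nd.1 ∉ L.map Prod.fst := fun hmem =>
        (hnd'.2.2 nd.1 hmem nd.1 (by simp)) rfl
      have hR : nd.1 ∉ R.map Prod.fst := (List.nodup_cons.mp hnd'.2.1).1
      have hLs : nd.1 ∉ (L.map (fun nd => (nd.1, pvSlot nd.2 items))).map Prod.fst := by
        rw [pv_keys_slot]; exact hL
      have hRs : nd.1 ∉ (R.map (fun nd => (nd.1, pvSlot nd.2 items))).map Prod.fst := by
        rw [pv_keys_slot]; exact hR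
      rw [hsplit, List.map_append, List.map_cons]
      rw [pv_insert_present _ _ nd.1 (pvSlot p.2 items) PySem.Dict.empty hLs hRs]
      rw [pv_A_inner nd.2 nd.1 items _ _ PySem.Dict.empty hLs hRs]
      rw [show (items.foldl (fun s prot =>
          if (PySem.Dict.ofList nd.2).contains prot then
            s.insert prot ((PySem.Dict.ofList nd.2).getD prot "")
          else s) PySem.Dict.empty) = pvSlot nd.2 items from rfl]
      have hdins : d.insert nd.1 nd.2 = PySem.Dict.mk (L ++ (nd.1, nd.2) :: R) := by
        conv_lhs => rw [show d = PySem.Dict.mk d.items from rfl, hsplit]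
        exact pv_insert_present L R nd.1 p.2 nd.2 hL hR
      have hnodup' : (((d.insert nd.1 nd.2).items).map Prod.fst).Nodup := by
        rw [hdins]
        rw [show (PySem.Dict.mk (L ++ (nd.1, nd.2) :: R)).items = L ++ (nd.1, nd.2) :: R from rfl]
        rw [hsplit] at hnd
        simpa using hnd
      have := ih (d.insert nd.1 nd.2) hnodup'
      rw [hdins] at this
      rw [show (PySem.Dict.mk (L ++ (nd.1, nd.2) :: R)).items = L ++ (nd.1, nd.2) :: R from rfl] at this
      rw [List.map_append, List.map_cons] at this
      rw [this, hdins]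
    · -- new name: both dicts append at the end
      have hnotin : nd.1 ∉ d.items.map Prod.fst := fun hmem =>
        hc ((pv_contains_mk_iff d.items nd.1).2 hmem)
      have hnotin' : nd.1 ∉ (d.items.map (fun nd => (nd.1, pvSlot nd.2 items))).map Prod.fst := by
        rw [pv_keys_slot]; exact hnotin
      rw [show (PySem.Dict.mk (d.items.map (fun nd => (nd.1, pvSlot nd.2 items)))).insert nd.1 PySem.Dict.empty
            = PySem.Dict.mk (d.items.map (fun nd => (nd.1, pvSlot nd.2 items)) ++ [(nd.1, PySem.Dict.empty)]) from
          pv_insert_absent _ nd.1 _ hnotin']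
      have happ : d.items.map (fun nd => (nd.1, pvSlot nd.2 items)) ++ [(nd.1, PySem.Dict.empty)]
          = d.items.map (fun nd => (nd.1, pvSlot nd.2 items)) ++ (nd.1, PySem.Dict.empty) :: [] := rfl
      rw [happ, pv_A_inner nd.2 nd.1 items _ [] PySem.Dict.empty hnotin' (by simp)]
      rw [show (items.foldl (fun s prot =>
          if (PySem.Dict.ofList nd.2).contains prot then
            s.insert prot ((PySem.Dict.ofList nd.2).getD prot "")
          else s) PySem.Dict.empty) = pvSlot nd.2 items from rfl]
      have hdins : d.insert nd.1 nd.2 = PySem.Dict.mk (d.items ++ [(nd.1, nd.2)]) :=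
        pv_insert_absent d.items nd.1 nd.2 hnotin
      have hnodup' : (((d.insert nd.1 nd.2).items).map Prod.fst).Nodup :=
        pv_nodup_insert d nd.1 nd.2 hnd
      have := ih (d.insert nd.1 nd.2) hnodup'
      rw [hdins] at this
      rw [show (PySem.Dict.mk (d.items ++ [(nd.1, nd.2)])).items = d.items ++ [(nd.1, nd.2)] from rfl] at this
      rw [List.map_append, List.map_cons, List.map_nil] at this
      rw [show ((nd.1, pvSlot nd.2 items) :: ([] : List (String × PySem.Dict String String)))
            = [(nd.1, pvSlot nd.2 items)] from rfl]
      rw [this, hdins]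

-- init loop of B
lemma pv_B_init :
    ∀ (db : List (String × (List (String × String)))) (L : List (String × PySem.Dict String String)),
      (db.map Prod.fst).Nodup →
      (∀ n ∈ db.map Prod.fst, n ∉ L.map Prod.fst) →
      db.foldl (fun r nd => r.insert nd.1 PySem.Dict.empty) (PySem.Dict.mk L)
      = PySem.Dict.mk (L ++ db.map (fun nd => (nd.1, (PySem.Dict.empty : PySem.Dict String String)))) := by
  intro db
  induction db with
  | nil => intro L _ _; simp
  | cons nd db ih =>
    intro L hnd hdisj
    have hndL : nd.1 ∉ L.map Prod.fst := hdisj nd.1 (by simp)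
    simp only [List.map_cons, List.nodup_cons] at hnd
    rw [List.foldl_cons, pv_insert_absent L nd.1 _ hndL]
    rw [ih (L ++ [(nd.1, PySem.Dict.empty)]) hnd.2 ?_]
    · simp
    · intro n hn
      simp only [List.map_append, List.map_cons, List.map_nil, List.mem_append,
        List.mem_singleton, not_or]
      exact ⟨hdisj n (by simp [hn]), by rintro rfl; exact hnd.1 hn⟩

-- filter of an assoc list with unique keys by one key: the singleton that key maps to, or nothing
lemma pv_filter_key_nil {ν : Type} (L : List (String × ν)) (k : String)
    (h : k ∉ L.map Prod.fst) : L.filter (fun p => p.1 == k) = [] := by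
  rw [List.filter_eq_nil_iff]
  intro p hp
  simp only [beq_iff_eq]
  exact fun he => h (List.mem_map.2 ⟨p, hp, he⟩)

lemma pv_filter_key (L : List (String × String)) (k : String)
    (h : (L.map Prod.fst).Nodup) :
    L.filter (fun p => p.1 == k) =
      if (PySem.Dict.mk L).contains k = true then [(k, (PySem.Dict.mk L).getD k "")] else [] := by
  induction L with
  | nil => simp [PySem.Dict.contains]
  | cons p L ih =>
    obtain ⟨a, v⟩ := p
    simp only [List.map_cons, List.nodup_cons] at h
    by_cases hak : a = k
    · subst hak
      have hmem : a ∈ (((a, v) :: L).map Prod.fst) := by simp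
      rw [if_pos ((pv_contains_mk_iff _ a).2 hmem)]
      have hget : (PySem.Dict.mk ((a, v) :: L)).getD a "" = v := by
        simp [PySem.Dict.getD, PySem.Dict.get?_mk_cons]
      rw [hget, List.filter_cons_of_pos (by simp), pv_filter_key_nil L a h.1]
    · have hcc : (PySem.Dict.mk ((a, v) :: L)).contains k = (PySem.Dict.mk L).contains k := by
        by_cases hk : (PySem.Dict.mk L).contains k = true
        · rw [hk, (pv_contains_mk_iff _ k).2]
          simp only [List.map_cons, List.mem_cons]
          exact Or.inr ((pv_contains_mk_iff _ k).1 hk)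
        · rw [Bool.not_eq_true] at hk
          rw [hk, ← Bool.not_eq_true, pv_contains_mk_iff]
          simp only [List.map_cons, List.mem_cons, not_or]
          refine ⟨fun he => hak he.symm, fun hm => ?_⟩
          rw [← Bool.not_eq_true] at hk
          exact hk ((pv_contains_mk_iff _ k).2 hm)
      have hgg : (PySem.Dict.mk ((a, v) :: L)).getD k "" = (PySem.Dict.mk L).getD k "" := by
        simp only [PySem.Dict.getD, PySem.Dict.get?_mk_cons]
        rw [if_neg (by simp only [beq_iff_eq]; exact hak)]
      rw [List.filter_cons_of_neg (by simp only [beq_iff_eq]; exact hak), hcc, hgg]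
      exact ih h.2

-- the inverted index characterised: its postings for prot are the per-db contributions in db order
lemma pv_index_getD (prot : String) :
    ∀ (L : List (String × List (String × String))) (ix : PySem.Dict String (List (String × String))),
      (L.foldl (fun ix nd =>
          (PySem.Dict.ofList nd.2).items.foldl
            (fun ix pv => ix.modify pv.1 [] (fun l => l ++ [(nd.1, pv.2)])) ix) ix).getD prot []
      = ix.getD prot [] ++ L.flatMap (pvPost prot) := by
  intro L
  induction L with
  | nil => intro ix; simp
  | cons nd L ih =>
    intro ix
    rw [List.foldl_cons, ih]
    have hstep : ((PySem.Dict.ofList nd.2).items.foldl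
        (fun ix pv => ix.modify pv.1 [] (fun l => l ++ [(nd.1, pv.2)])) ix).getD prot []
        = ix.getD prot [] ++ pvPost prot nd := by
      have hmap : (PySem.Dict.ofList nd.2).items.foldl
          (fun ix pv => ix.modify pv.1 [] (fun l => l ++ [(nd.1, pv.2)])) ix
          = ((PySem.Dict.ofList nd.2).items.map (fun pv => (pv.1, (nd.1, pv.2)))).foldl
              (fun d p => d.modify p.1 [] (fun l => l ++ [p.2])) ix := by
        rw [List.foldl_map]
      rw [hmap, PySem.Dict.getD_foldl_modify_append]
      congr 1
      rw [List.filter_map]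
      have hnodk : (((PySem.Dict.ofList nd.2).items).map Prod.fst).Nodup := by
        have := PySem.Dict.nodup_keys_ofList (ps := nd.2)
        simpa [PySem.Dict.keys] using this
      have hfk := pv_filter_key (PySem.Dict.ofList nd.2).items prot hnodk
      rw [show (PySem.Dict.mk (PySem.Dict.ofList nd.2).items) = PySem.Dict.ofList nd.2 from rfl] at hfk
      have hpred : ((fun p => p.1 == prot) ∘ (fun pv : String × String => (pv.1, (nd.1, pv.2))))
          = (fun p : String × String => p.1 == prot) := rfl
      rw [hpred, hfk]
      by_cases hcp : (PySem.Dict.ofList nd.2).contains prot = true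
      · simp [hcp, pvPost]
      · rw [Bool.not_eq_true] at hcp
        simp [hcp, pvPost]
    rw [hstep, List.flatMap_cons, List.append_assoc]

-- folding over a flatMap is a nested fold
lemma pv_foldl_flatMap {α β γ : Type} (g : α → List γ) (f : β → γ → β) :
    ∀ (l : List α) (i : β),
      (l.flatMap g).foldl f i = l.foldl (fun acc x => (g x).foldl f acc) i := by
  intro l
  induction l with
  | nil => intro i; rfl
  | cons a l ih =>
    intro i
    rw [List.flatMap_cons, List.foldl_append, List.foldl_cons, ih]

-- folding one postings contribution is exactly A's guarded update
lemma pv_post_step (prot : String) (nd : String × List (String × String))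
    (r : PySem.Dict String (PySem.Dict String String)) :
    (pvPost prot nd).foldl
        (fun r nv => r.modify nv.1 PySem.Dict.empty (fun d => d.insert prot nv.2)) r
    = if (PySem.Dict.ofList nd.2).contains prot then
        r.modify nd.1 PySem.Dict.empty
          (fun d => d.insert prot ((PySem.Dict.ofList nd.2).getD prot ""))
      else r := by
  by_cases hc : (PySem.Dict.ofList nd.2).contains prot = true
  · simp [pvPost, hc]
  · rw [Bool.not_eq_true] at hc
    simp [pvPost, hc]

-- one item of the guarded fill across all dbs, updating every slot pointwise
lemma pv_B_item (prot : String) :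
    ∀ (db : List (String × (List (String × String)))) (L : List (String × PySem.Dict String String))
      (s : (String × (List (String × String))) → PySem.Dict String String),
      (db.map Prod.fst).Nodup →
      (∀ n ∈ db.map Prod.fst, n ∉ L.map Prod.fst) →
      db.foldl (fun r nd =>
          if (PySem.Dict.ofList nd.2).contains prot then
            r.modify nd.1 PySem.Dict.empty
              (fun d => d.insert prot ((PySem.Dict.ofList nd.2).getD prot ""))
          else r)
        (PySem.Dict.mk (L ++ db.map (fun nd => (nd.1, s nd))))
      = PySem.Dict.mk (L ++ db.map (fun nd => (nd.1,
          if (PySem.Dict.ofList nd.2).contains prot then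
            (s nd).insert prot ((PySem.Dict.ofList nd.2).getD prot "")
          else s nd))) := by
  intro db
  induction db with
  | nil => intro L _ _ _; simp
  | cons nd db ih =>
    intro L s hnd hdisj
    have hndL : nd.1 ∉ L.map Prod.fst := hdisj nd.1 (by simp)
    simp only [List.map_cons, List.nodup_cons] at hnd
    have hndR : nd.1 ∉ (db.map (fun nd => (nd.1, s nd))).map Prod.fst := by
      simpa using hnd.1
    have hdisj' : ∀ n ∈ db.map Prod.fst,
        n ∉ (L ++ [(nd.1, if (PySem.Dict.ofList nd.2).contains prot then
            (s nd).insert prot ((PySem.Dict.ofList nd.2).getD prot "") else s nd)]).map Prod.fst := by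
      intro n hn
      simp only [List.map_append, List.map_cons, List.map_nil, List.mem_append,
        List.mem_singleton, not_or]
      exact ⟨hdisj n (by simp [hn]), by rintro rfl; exact hnd.1 hn⟩
    rw [List.foldl_cons, List.map_cons]
    by_cases hc : (PySem.Dict.ofList nd.2).contains prot = true
    · simp only [hc, if_true]
      rw [pv_modify_mid L (db.map (fun nd => (nd.1, s nd))) nd.1 (s nd) PySem.Dict.empty _ hndL hndR]
      have := ih (L ++ [(nd.1, (s nd).insert prot ((PySem.Dict.ofList nd.2).getD prot ""))]) s hnd.2
        (by simpa only [hc, if_true] using hdisj')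
      simp only [List.append_assoc, List.singleton_append] at this
      rw [this]
      simp [hc]
    · simp only [Bool.not_eq_true] at hc
      simp only [hc, Bool.false_eq_true, if_false]
      have := ih (L ++ [(nd.1, s nd)]) s hnd.2
        (by simpa only [hc, Bool.false_eq_true, if_false] using hdisj')
      simp only [List.append_assoc, List.singleton_append] at this
      rw [this]
      simp [hc]

-- the items loop of the guarded fill
lemma pv_B_loop (db : List (String × (List (String × String))))
    (hnd : (db.map Prod.fst).Nodup) :
    ∀ (items : List String) (g : (String × (List (String × String))) → PySem.Dict String String),
      items.foldl (fun r prot =>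
          db.foldl (fun r nd =>
            if (PySem.Dict.ofList nd.2).contains prot then
              r.modify nd.1 PySem.Dict.empty
                (fun d => d.insert prot ((PySem.Dict.ofList nd.2).getD prot ""))
            else r) r)
        (PySem.Dict.mk (db.map (fun nd => (nd.1, g nd))))
      = PySem.Dict.mk (db.map (fun nd => (nd.1,
          items.foldl (fun s prot =>
            if (PySem.Dict.ofList nd.2).contains prot then
              s.insert prot ((PySem.Dict.ofList nd.2).getD prot "")
            else s) (g nd)))) := by
  intro items
  induction items with
  | nil => intro g; simp
  | cons prot items ih =>
    intro g
    rw [List.foldl_cons]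
    have hitem := pv_B_item prot db [] (fun nd => g nd) hnd (by simp)
    simp only [List.nil_append] at hitem
    rw [hitem]
    rw [ih (fun nd => if (PySem.Dict.ofList nd.2).contains prot then
          (g nd).insert prot ((PySem.Dict.ofList nd.2).getD prot "") else g nd)]
    simp only [List.foldl_cons]

-- B's postings-driven fill equals the guarded fill over all dbs
lemma pv_fill_eq (dbL : List (String × List (String × String))) (items : List String)
    (r0 : PySem.Dict String (PySem.Dict String String)) :
    items.foldl (fun r prot =>
        (((dbL.foldl (fun ix nd =>
            (PySem.Dict.ofList nd.2).items.foldl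
              (fun ix pv => ix.modify pv.1 [] (fun l => l ++ [(nd.1, pv.2)])) ix)
          PySem.Dict.empty).getD prot []).foldl
          (fun r nv => r.modify nv.1 PySem.Dict.empty (fun d => d.insert prot nv.2)) r)) r0
    = items.foldl (fun r prot =>
        dbL.foldl (fun r nd =>
          if (PySem.Dict.ofList nd.2).contains prot then
            r.modify nd.1 PySem.Dict.empty
              (fun d => d.insert prot ((PySem.Dict.ofList nd.2).getD prot ""))
          else r) r) r0 := by
  have hfun : (fun (r : PySem.Dict String (PySem.Dict String String)) (prot : String) =>
      (((dbL.foldl (fun ix nd =>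
          (PySem.Dict.ofList nd.2).items.foldl
            (fun ix pv => ix.modify pv.1 [] (fun l => l ++ [(nd.1, pv.2)])) ix)
        PySem.Dict.empty).getD prot []).foldl
        (fun r nv => r.modify nv.1 PySem.Dict.empty (fun d => d.insert prot nv.2)) r))
      = (fun r prot =>
        dbL.foldl (fun r nd =>
          if (PySem.Dict.ofList nd.2).contains prot then
            r.modify nd.1 PySem.Dict.empty
              (fun d => d.insert prot ((PySem.Dict.ofList nd.2).getD prot ""))
          else r) r) := by
    funext r prot
    rw [pv_index_getD prot dbL PySem.Dict.empty]
    rw [show (PySem.Dict.empty : PySem.Dict String (List (String × String))).getD prot [] = []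
      from rfl]
    rw [List.nil_append, pv_foldl_flatMap]
    have hfun2 : (fun (r' : PySem.Dict String (PySem.Dict String String)) nd =>
        (pvPost prot nd).foldl
          (fun r nv => r.modify nv.1 PySem.Dict.empty (fun d => d.insert prot nv.2)) r')
        = (fun r' nd =>
          if (PySem.Dict.ofList nd.2).contains prot then
            r'.modify nd.1 PySem.Dict.empty
              (fun d => d.insert prot ((PySem.Dict.ofList nd.2).getD prot ""))
          else r') := funext fun r' => funext fun nd => pv_post_step prot nd r'
    rw [hfun2]
  rw [hfun]

-- ===== VERDICT (by name: the statement is the Claim_ definition above) =====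
theorem search_spec : Claim_equal_search := by
  intro db items _
  simp only [Spec_search, search, search_alt]
  have hd : (((db.foldl (fun d nd => d.insert nd.1 nd.2)
        (PySem.Dict.empty : PySem.Dict String (List (String × String)))).items).map Prod.fst).Nodup :=
    pv_dedup_nodup db PySem.Dict.empty (by simp [PySem.Dict.empty])
  have hA := pv_A_eq items db PySem.Dict.empty (by simp [PySem.Dict.empty])
  have hB0 := pv_B_init ((db.foldl (fun d nd => d.insert nd.1 nd.2)
      (PySem.Dict.empty : PySem.Dict String (List (String × String)))).items) [] hd (by simp)
  have hBL := pv_B_loop ((db.foldl (fun d nd => d.insert nd.1 nd.2)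
      (PySem.Dict.empty : PySem.Dict String (List (String × String)))).items) hd items
      (fun _ => PySem.Dict.empty)
  simp only [List.nil_append] at hB0
  rw [show (PySem.Dict.mk ([] : List (String × PySem.Dict String String))) = PySem.Dict.empty from rfl] at hB0
  rw [show (PySem.Dict.mk (((PySem.Dict.empty : PySem.Dict String (List (String × String))).items).map
        (fun nd => (nd.1, pvSlot nd.2 items)))) = PySem.Dict.empty from rfl] at hA
  rw [hA, hB0, pv_fill_eq, hBL]
  rfl
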